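-- pv_equiv track=rewrite | github.com/austinProGit/scheduler | src/schedule_inspector.py | senior_year_semesters_list
-- ===== SOURCE A (Python) =====
-- def schedule_length(schedule):
--     return len(schedule)
--
-- def semester_type_sequence(schedule):
--     SEMESTER_TYPE_SUCCESSOR = {'Fa': 'Sp', 'Sp': 'Su', 'Su': 'Fa'}
--     sequence = None
--     previous_season = 'Su'
--     if schedule_length(schedule) > 0:
--         sequence = []
--         for semester in schedule:
--             sequence.append(SEMESTER_TYPE_SUCCESSOR[previous_season])
--             previous_season = SEMESTER_TYPE_SUCCESSOR[previous_season]
--     return sequence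
--
-- def last_semester_type(schedule):
--     semester_types = semester_type_sequence(schedule)
--     if semester_types != None:
--         return semester_types[-1]
--     else: return None
--
-- def senior_interval(schedule):
--     last_type = last_semester_type(schedule)
--     if last_type == 'Su':
--         return -3
--     if last_type == 'Sp':
--         return -2
--     if last_type == 'Fa':
--         return -1
--
-- def senior_year_semesters_list(schedule):
--     if schedule == None or schedule == [] or schedule == [[]]:
--         return None
--     senior_semesters = []
--     index = senior_interval(schedule)
--     for i in range(index, 0):
--         for semester in schedule[i]:
--             senior_semesters.append(semester)
--     return senior_semesters
-- ===== SOURCE B (Python) =====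
-- def senior_year_semesters_list(schedule):
--     if not schedule or schedule == [[]]:
--         return None
--     k = (len(schedule) - 1) % 3 + 1
--     return [course for semester in schedule[-k:] for course in semester]
-- ===== Notes on version B (the rewrite author's own statement) =====
-- stated objective: simpler
-- what changed: B computes the senior interval directly as (len(schedule)-1)%3+1 by modular arithmetic instead of building the full semester-type sequence list through four helper functions, and flattens the last k semesters with a slice and one comprehension.
import Mathlib
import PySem

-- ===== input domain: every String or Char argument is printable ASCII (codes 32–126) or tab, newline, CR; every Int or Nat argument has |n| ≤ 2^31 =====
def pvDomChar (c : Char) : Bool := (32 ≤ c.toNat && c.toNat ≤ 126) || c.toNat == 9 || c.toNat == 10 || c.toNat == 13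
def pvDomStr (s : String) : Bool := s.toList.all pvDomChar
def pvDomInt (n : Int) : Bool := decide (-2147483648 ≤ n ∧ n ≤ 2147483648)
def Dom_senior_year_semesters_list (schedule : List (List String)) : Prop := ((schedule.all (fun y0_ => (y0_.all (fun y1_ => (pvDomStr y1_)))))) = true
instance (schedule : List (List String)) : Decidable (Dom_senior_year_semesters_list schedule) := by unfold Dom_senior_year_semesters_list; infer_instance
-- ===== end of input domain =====

-- B computes the senior interval with modular arithmetic and a slice, skipping the semester-type sequence list and its helpers (simpler).
-- ===== PORT A =====
-- helper: the SEMESTER_TYPE_SUCCESSOR dict as a lookup (keys always one of the three; "" = unreachable KeyError)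
def pySucc (s : String) : String :=
  if s = "Fa" then "Sp" else if s = "Sp" then "Su" else if s = "Su" then "Fa" else ""

def semester_type_sequence (schedule : List (List String)) : Option (List String) :=
  if schedule.length > 0 then
    some ((schedule.foldl (fun (st : List String × String) _ =>
      (st.1 ++ [pySucc st.2], pySucc st.2)) (([] : List String), "Su")).1)
  else none

def last_semester_type (schedule : List (List String)) : Option String :=
  (semester_type_sequence schedule).bind (fun l => PySem.List.pyGet? l (-1))

def senior_interval (schedule : List (List String)) : Option Int :=
  match last_semester_type schedule with
  | some "Su" => some (-3)
  | some "Sp" => some (-2)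
  | some "Fa" => some (-1)
  | _ => none

def senior_year_semesters_list (schedule : List (List String)) : Option (List String) :=
  -- 'schedule == None' has no typed counterpart; [] and [[]] return None
  if schedule = [] ∨ schedule = [[]] then none
  else
    -- index is always some here (schedule nonempty); getD 0 gives an empty range in the unreachable case
    let index := (senior_interval schedule).getD 0
    some ((PySem.List.pyRange index 0 1).foldl
      (fun acc i => acc ++ ((PySem.List.pyGet? schedule i).getD [])) [])


-- ===== PORT B =====
def senior_year_semesters_list_alt (schedule : List (List String)) : Option (List String) :=
  if schedule = [] ∨ schedule = [[]] then none
  else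
    let k : Int := ((schedule.length : Int) - 1) % 3 + 1
    some ((PySem.List.slice schedule (some (-k)) none).flatten)


-- ===== PRECONDITION & SPEC =====
def Spec_senior_year_semesters_list (schedule : List (List String)) (out : Option (List String)) : Prop := out = senior_year_semesters_list_alt schedule
instance (schedule : List (List String)) (out : Option (List String)) : Decidable (Spec_senior_year_semesters_list schedule out) := by unfold Spec_senior_year_semesters_list; infer_instance

-- ===== CLAIM (what is proved, stated in full; the proofs are below) =====
def Claim_equal_senior_year_semesters_list : Prop := ∀ (schedule : List (List String)), Dom_senior_year_semesters_list schedule → Spec_senior_year_semesters_list schedule (senior_year_semesters_list schedule)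

-- ===== LEMMAS AND PROOFS =====


-- the loop body of semester_type_sequence
lemma pvSeq_snd (l : List (List String)) : ∀ (acc : List String) (prev : String),
    (List.foldl (fun (st : List String × String) _ => (st.1 ++ [pySucc st.2], pySucc st.2)) (acc, prev) l).2
      = pySucc^[l.length] prev := by
  induction l with
  | nil => intro acc prev; simp
  | cons x xs ih =>
      intro acc prev
      simp only [List.foldl_cons, List.length_cons, Function.iterate_succ_apply]
      exact ih _ _

lemma pvSeq_last (l : List (List String)) : ∀ (acc : List String) (prev : String), l ≠ [] →
    (List.foldl (fun (st : List String × String) _ => (st.1 ++ [pySucc st.2], pySucc st.2)) (acc, prev) l).1.getLast?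
      = some ((List.foldl (fun (st : List String × String) _ => (st.1 ++ [pySucc st.2], pySucc st.2)) (acc, prev) l).2) := by
  induction l with
  | nil => intro _ _ h; exact absurd rfl h
  | cons x xs ih =>
      intro acc prev _
      rcases xs with _ | ⟨y, ys⟩
      · simp
      · exact ih _ _ (by simp)

lemma pvIter_mod : ∀ (n : Nat), pySucc^[n] "Su" = pySucc^[n % 3] "Su" := by
  intro n
  induction n using Nat.strong_induction_on with
  | _ n ih =>
      by_cases h : n < 3
      · rw [Nat.mod_eq_of_lt h]
      · have h3 : n = (n - 3) + 3 := by omega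
        rw [h3, Function.iterate_add_apply]
        have : pySucc^[3] "Su" = "Su" := rfl
        rw [this, ih (n - 3) (by omega)]
        congr 1
        omega

lemma pvLast_type (schedule : List (List String)) (h : schedule ≠ []) :
    last_semester_type schedule = some (pySucc^[schedule.length % 3] "Su") := by
  have hlen : schedule.length > 0 := List.length_pos_iff.mpr h
  unfold last_semester_type semester_type_sequence
  simp only [hlen, if_pos, Option.bind_some]
  rw [PySem.List.pyGet?_neg_one, pvSeq_last schedule [] "Su" h, pvSeq_snd schedule [] "Su",
      pvIter_mod]

-- A's inner loop flattens the last k sublists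
lemma pvKey (s : List (List String)) : ∀ (k : Nat), k ≤ s.length →
    (PySem.List.pyRange (-(k : Int)) 0 1).flatMap (fun i => (PySem.List.pyGet? s i).getD [])
      = (s.drop (s.length - k)).flatten := by
  intro k
  induction k with
  | zero =>
      intro _
      rw [PySem.List.pyRange_one_eq_nil (by simp)]
      simp
  | succ k ih =>
      intro hk
      have hlt : s.length - (k + 1) < s.length := by omega
      have hidx : PySem.List.pyGet? s (-((k + 1 : Nat) : Int)) = s[s.length - (k + 1)]? :=
        PySem.List.pyGet?_neg_natCast s (k + 1) (by omega) (by omega)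
      rw [PySem.List.pyRange_one_cons (show -((k + 1 : Nat) : Int) < 0 by push_cast; omega),
          List.flatMap_cons,
          show (-((k + 1 : Nat) : Int) + 1) = -(k : Int) by push_cast; ring,
          ih (by omega), hidx,
          show s.length - k = s.length - (k + 1) + 1 by omega,
          List.drop_eq_getElem_cons hlt, List.flatten_cons,
          List.getElem?_eq_getElem hlt, Option.getD_some]

-- the whole value of A for a given senior interval k ∈ {1,2,3}
lemma pvA_loop (s : List (List String)) (k : Nat) (hk : k ≤ s.length) :
    List.foldl (fun acc i => acc ++ ((PySem.List.pyGet? s i).getD [])) []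
        (PySem.List.pyRange (-(k : Int)) 0 1)
      = (s.drop (s.length - k)).flatten := by
  rw [PySem.List.foldl_append_eq_flatMap, List.nil_append, pvKey s k hk]

-- ===== VERDICT (by name: the statement is the Claim_ definition above) =====
theorem senior_year_semesters_list_spec : Claim_equal_senior_year_semesters_list := by
  intro schedule _
  unfold Spec_senior_year_semesters_list senior_year_semesters_list senior_year_semesters_list_alt
  by_cases hnil : schedule = [] ∨ schedule = [[]]
  · simp [hnil]
  · simp only [hnil, if_neg, not_false_iff]
    have hne : schedule ≠ [] := fun h => hnil (Or.inl h)
    have hlen : 1 ≤ schedule.length := List.length_pos_iff.mpr hne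
    have hlast := pvLast_type schedule hne
    have hm : schedule.length % 3 = 0 ∨ schedule.length % 3 = 1 ∨ schedule.length % 3 = 2 := by omega
    rcases hm with hm | hm | hm
    · -- last type "Su", interval -3, k = 3
      have h3 : 3 ≤ schedule.length := by omega
      have hint : senior_interval schedule = some (-3) := by
        unfold senior_interval; rw [hlast, hm]; rfl
      have hkB : ((schedule.length : Int) - 1) % 3 + 1 = 3 := by omega
      rw [hint, hkB]
      simp only [Option.getD_some]
      rw [show (-3 : Int) = -((3 : Nat) : Int) by norm_num,
          pvA_loop schedule 3 h3,
          PySem.List.slice_from_neg_natCast schedule 3 (by omega)]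
    · -- last type "Fa", interval -1, k = 1
      have hint : senior_interval schedule = some (-1) := by
        unfold senior_interval; rw [hlast, hm]; rfl
      have hkB : ((schedule.length : Int) - 1) % 3 + 1 = 1 := by omega
      rw [hint, hkB]
      simp only [Option.getD_some]
      rw [show (-1 : Int) = -((1 : Nat) : Int) by norm_num,
          pvA_loop schedule 1 hlen,
          PySem.List.slice_from_neg_natCast schedule 1 (by omega)]
    · -- last type "Sp", interval -2, k = 2
      have h2 : 2 ≤ schedule.length := by omega
      have hint : senior_interval schedule = some (-2) := by
        unfold senior_interval; rw [hlast, hm]; rfl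
      have hkB : ((schedule.length : Int) - 1) % 3 + 1 = 2 := by omega
      rw [hint, hkB]
      simp only [Option.getD_some]
      rw [show (-2 : Int) = -((2 : Nat) : Int) by norm_num,
          pvA_loop schedule 2 h2,
          PySem.List.slice_from_neg_natCast schedule 2 (by omega)]
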